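-- pv_equiv track=rewrite | github.com/JRC1995/KPDrop | preprocess/process_kp20k_big_unsup.py | create_first_mask
-- ===== SOURCE A (Python) =====
-- def create_first_mask(src):
--     fm = []
--     item_dict = {}
--     for item in src:
--         if item in item_dict:
--             fm.append(0)
--         else:
--             fm.append(1)
--             item_dict[item] = 1
--     return fm
-- ===== SOURCE B (Python) =====
-- def create_first_mask(src):
--     first_index = {}
--     for i, item in enumerate(src):
--         first_index.setdefault(item, i)
--     return [1 if first_index[item] == i else 0 for i, item in enumerate(src)]
-- ===== Notes on version B (the rewrite author's own statement) =====
-- stated objective: alternative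
-- what changed: B replaces A's single streaming pass with a mutable seen-set by two independent passes: one building a first-occurrence index table with setdefault, then a stateless comprehension marking positions whose index equals their item's first index.
import Mathlib
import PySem

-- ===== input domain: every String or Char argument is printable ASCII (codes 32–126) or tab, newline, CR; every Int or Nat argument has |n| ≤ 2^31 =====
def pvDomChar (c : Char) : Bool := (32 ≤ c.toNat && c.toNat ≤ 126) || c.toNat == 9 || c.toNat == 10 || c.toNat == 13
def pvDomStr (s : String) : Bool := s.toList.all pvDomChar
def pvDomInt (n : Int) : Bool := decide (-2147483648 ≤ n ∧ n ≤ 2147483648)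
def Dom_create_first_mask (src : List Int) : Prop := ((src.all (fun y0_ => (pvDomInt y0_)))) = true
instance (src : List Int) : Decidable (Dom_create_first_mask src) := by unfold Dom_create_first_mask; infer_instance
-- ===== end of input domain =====

-- B rewrites A's single streaming pass (seen-set + append) as two independent passes:
-- build a first-occurrence index table, then compare each position with its item's first index.
-- Same return value everywhere (alternative decomposition, no speed claim).

-- ===== PORT A =====
def create_first_mask (src : List Int) : List Int :=
  (src.foldl
    (fun (st : List Int × PySem.Dict Int Int) item =>
      if st.2.contains item then (st.1 ++ [0], st.2)
      else (st.1 ++ [1], st.2.insert item 1))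
    ([], PySem.Dict.empty)).1

-- ===== PORT B =====
def create_first_mask_alt (src : List Int) : List Int :=
  let first_index : PySem.Dict Int Int :=
    (PySem.List.enumerate src).foldl (fun d p => d.setdefault p.2 p.1) PySem.Dict.empty
  (PySem.List.enumerate src).map
    (fun p => if first_index.get? p.2 = some p.1 then (1 : Int) else 0)

-- ===== PRECONDITION & SPEC =====
def Spec_create_first_mask (src : List Int) (out : List Int) : Prop := out = create_first_mask_alt src
instance (src : List Int) (out : List Int) : Decidable (Spec_create_first_mask src out) := by unfold Spec_create_first_mask; infer_instance

-- ===== CLAIM (what is proved, stated in full; the proofs are below) =====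
def Claim_equal_create_first_mask : Prop := ∀ (src : List Int), Dom_create_first_mask src → Spec_create_first_mask src (create_first_mask src)

-- ===== LEMMAS AND PROOFS =====

/-- Common reference mask: position gets 1 iff its item is absent from the prefix before it. -/
def pvMask (pre : List Int) : List Int → List Int
  | [] => []
  | x :: xs => (if x ∈ pre then (0 : Int) else 1) :: pvMask (pre ++ [x]) xs

/-- `pvMask` only depends on the membership of the prefix. -/
theorem pvMask_congr (l : List Int) : ∀ (pre pre' : List Int),
    (∀ y : Int, y ∈ pre ↔ y ∈ pre') → pvMask pre l = pvMask pre' l := by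
  induction l with
  | nil => intro _ _ _; rfl
  | cons x xs ih =>
    intro pre pre' h
    simp only [pvMask]
    by_cases hx : x ∈ pre
    · simp [hx, (h x).mp hx, ih (pre ++ [x]) (pre' ++ [x]) (fun y => by simp [h y])]
    · have hx' : x ∉ pre' := fun q => hx ((h x).mpr q)
      simp [hx, hx', ih (pre ++ [x]) (pre' ++ [x]) (fun y => by simp [h y])]

theorem portA_eq_mask (l : List Int) : ∀ (fm pre : List Int) (d : PySem.Dict Int Int),
    (∀ x : Int, d.contains x = decide (x ∈ pre)) →
    (l.foldl
      (fun (st : List Int × PySem.Dict Int Int) item =>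
        if st.2.contains item then (st.1 ++ [0], st.2)
        else (st.1 ++ [1], st.2.insert item 1))
      (fm, d)).1 = fm ++ pvMask pre l := by
  induction l with
  | nil => intro fm pre d _; simp [pvMask]
  | cons x xs ih =>
    intro fm pre d hd
    simp only [List.foldl_cons, pvMask, hd x]
    by_cases hx : x ∈ pre
    · simp only [hx, decide_true, if_true]
      rw [ih (fm ++ [0]) pre d hd,
        pvMask_congr xs pre (pre ++ [x])
          (fun y => ⟨fun hy => List.mem_append.mpr (Or.inl hy),
            fun hy => by
              rcases List.mem_append.mp hy with h | h
              · exact h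
              · simp only [List.mem_singleton] at h; simpa [h] using hx⟩)]
      simp
    · simp only [hx, decide_false, Bool.false_eq_true, if_false]
      rw [ih (fm ++ [1]) (pre ++ [x]) (d.insert x 1)]
      · simp
      · intro y
        rw [PySem.Dict.contains_insert, hd y]
        by_cases hy : y = x <;> simp [hy, hx]

theorem setdefault_loop_get? (l : List Int) : ∀ (s : Int) (d : PySem.Dict Int Int) (x : Int),
    ((PySem.List.enumerate l s).foldl (fun d p => d.setdefault p.2 p.1) d).get? x
      = (d.get? x).orElse (fun _ => (PySem.List.index? l x).map (fun k : Nat => s + (k : Int))) := by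
  induction l with
  | nil =>
    intro s d x
    simp [PySem.List.enumerate_nil, PySem.List.index?_eq_idxOf?, Option.orElse]
    cases d.get? x <;> rfl
  | cons y ys ih =>
    intro s d x
    rw [PySem.List.enumerate_cons, List.foldl_cons, ih]
    dsimp only
    by_cases hxy : y = x
    · subst hxy
      rw [PySem.List.index?_cons_self]
      cases hc : d.contains y with
      | true =>
        rw [PySem.Dict.setdefault_of_contains d _ hc]
        have : (d.get? y).isSome := by rw [← PySem.Dict.contains_eq_isSome_get?, hc]
        obtain ⟨v, hv⟩ := Option.isSome_iff_exists.mp this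
        simp [hv, Option.orElse]
      | false =>
        rw [PySem.Dict.setdefault_of_not_contains d _ hc]
        have hn : d.get? y = none := by
          cases h : d.get? y with
          | none => rfl
          | some v =>
            exfalso
            have : (d.get? y).isSome := by rw [h]; rfl
            rw [← PySem.Dict.contains_eq_isSome_get?, hc] at this
            exact Bool.noConfusion this
        simp [hn, PySem.Dict.get?_insert_self, Option.orElse]
    · rw [PySem.List.index?_cons_of_ne ys hxy]
      have hget : (d.setdefault y s).get? x = d.get? x := by
        cases hc : d.contains y with
        | true => rw [PySem.Dict.setdefault_of_contains d _ hc]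
        | false =>
          rw [PySem.Dict.setdefault_of_not_contains d _ hc,
            PySem.Dict.get?_insert_of_ne d _ (fun h => hxy (Eq.symm h))]
      rw [hget]
      cases hg : d.get? x with
      | some v => simp [Option.orElse]
      | none =>
        simp only [Option.orElse]
        cases hi : PySem.List.index? ys x with
        | none => simp
        | some k =>
          simp only [Option.map_some]
          congr 1
          push_cast
          ring

theorem portB_map_eq_mask (l : List Int) : ∀ (pre : List Int),
    (PySem.List.enumerate l (pre.length : Int)).map
      (fun p => if (PySem.List.index? (pre ++ l) p.2).map (fun k : Nat => (k : Int)) = some p.1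
                then (1 : Int) else 0)
      = pvMask pre l := by
  induction l with
  | nil => intro pre; simp [PySem.List.enumerate_nil, pvMask]
  | cons x xs ih =>
    intro pre
    rw [PySem.List.enumerate_cons, List.map_cons, pvMask]
    refine congrArg₂ List.cons ?_ ?_
    ·
      by_cases hx : x ∈ pre
      · obtain ⟨k, hk⟩ := Option.isSome_iff_exists.mp
          ((PySem.List.index?_isSome_iff pre x).mpr hx)
        have hlt : k < pre.length := by
          obtain ⟨p1, suf, hdec, hlen, _⟩ := (PySem.List.index?_eq_some_iff _ _ _).mp hk
          subst hdec; subst hlen; simp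
        rw [PySem.List.index?_append_of_mem _ hx, hk]
        have : ((k : Int)) ≠ (pre.length : Int) := by
          intro h; omega
        simp [hx, this]
      · have : PySem.List.index? (pre ++ x :: xs) x = some pre.length :=
          (PySem.List.index?_eq_some_iff _ _ _).mpr ⟨pre, xs, rfl, rfl, hx⟩
        rw [this]
        simpa using hx
    · have := ih (pre ++ [x])
      simp only [List.length_append, List.length_cons, List.length_nil,
        List.append_assoc, List.cons_append, List.nil_append,
        Nat.cast_add, Nat.cast_one] at this
      exact this

theorem portB_eq_mask (src : List Int) : create_first_mask_alt src = pvMask [] src := by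
  unfold create_first_mask_alt
  have h := portB_map_eq_mask src []
  simp only [List.nil_append, List.length_nil, Int.natCast_zero] at h
  rw [← h]
  apply List.map_congr_left
  intro p _
  have hget := setdefault_loop_get? src 0 PySem.Dict.empty p.2
  rw [PySem.Dict.get?_empty] at hget
  simp only [Option.orElse] at hget
  rw [hget]
  simp only [zero_add]
  rfl

-- ===== VERDICT (by name: the statement is the Claim_ definition above) =====
theorem create_first_mask_spec : Claim_equal_create_first_mask := by
  intro src _
  unfold Spec_create_first_mask
  rw [portB_eq_mask]
  have h := portA_eq_mask src [] [] PySem.Dict.empty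
    (by intro x; simp [PySem.Dict.contains_empty])
  simpa [create_first_mask] using h
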